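-- pv_equiv track=rewrite | github.com/SergeyOberemok/python-storybook | Math/lib/numbers.py | getTerms
-- ===== SOURCE A (Python) =====
-- def getTerms(number, maxBase=10):
--     terms = []
--
--     for index, term in enumerate(range(number, 0, -1)):
--         if index == 0:
--             continue
--
--         if number == index + term and index <= term < maxBase:
--             terms.append((index, term))
--
--     return terms
-- ===== SOURCE B (Python) =====
-- def getTerms(number, maxBase=10):
--     lo = max(1, number - maxBase + 1)
--     hi = number // 2
--     return [(i, number - i) for i in range(lo, hi + 1)]
-- ===== Notes on version B (the rewrite author's own statement) =====
-- stated objective: faster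
-- what changed: Replaces the O(number) scan over range(number,0,-1) with a directly computed valid index interval max(1, number-maxBase+1)..number//2, emitting only the pairs that pass A's test.
import Mathlib
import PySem

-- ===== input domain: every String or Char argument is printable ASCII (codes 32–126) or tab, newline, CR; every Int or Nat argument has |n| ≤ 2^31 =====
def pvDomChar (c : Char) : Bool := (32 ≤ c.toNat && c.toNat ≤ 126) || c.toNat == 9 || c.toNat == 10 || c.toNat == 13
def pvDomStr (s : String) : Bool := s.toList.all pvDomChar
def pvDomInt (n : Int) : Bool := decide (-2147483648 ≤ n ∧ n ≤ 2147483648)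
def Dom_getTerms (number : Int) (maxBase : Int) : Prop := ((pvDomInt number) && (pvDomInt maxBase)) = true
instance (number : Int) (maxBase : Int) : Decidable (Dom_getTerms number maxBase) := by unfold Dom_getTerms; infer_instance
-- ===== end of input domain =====

-- B replaces A's O(number) scan over range(number,0,-1) by directly computing the
-- valid index interval max(1, number-maxBase+1) .. number//2 (objective: faster, asymptotic).

-- ===== PORT A =====
-- 'enumerate' is carried as the Int counter st.1; 'terms.append' is cons onto the
-- accumulator with one final reverse (the same appends in the same order, kept linear).
def getTerms (number : Int) (maxBase : Int) : List (Int × Int) :=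
  ((PySem.List.pyRange number 0 (-1)).foldl
    (fun (st : Int × List (Int × Int)) term =>
      let index := st.1
      let terms := st.2
      ( index + 1,
        if index = 0 then terms
        else if number = index + term ∧ index ≤ term ∧ term < maxBase then (index, term) :: terms
        else terms)) (0, [])).2.reverse

-- ===== PORT B =====
def getTerms_alt (number : Int) (maxBase : Int) : List (Int × Int) :=
  (PySem.List.pyRange (max 1 (number - maxBase + 1)) (PySem.Int.floordiv number 2 + 1) 1).map
    (fun i => (i, number - i))

-- ===== PRECONDITION & SPEC =====
def Spec_getTerms (number : Int) (maxBase : Int) (out : List (Int × Int)) : Prop := out = getTerms_alt number maxBase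
instance (number : Int) (maxBase : Int) (out : List (Int × Int)) : Decidable (Spec_getTerms number maxBase out) := by unfold Spec_getTerms; infer_instance

-- ===== CLAIM (what is proved, stated in full; the proofs are below) =====
def Claim_equal_getTerms : Prop := ∀ (number : Int) (maxBase : Int), Dom_getTerms number maxBase → Spec_getTerms number maxBase (getTerms number maxBase)

-- ===== LEMMAS AND PROOFS =====

-- enumerate of a map over List.range is a map over List.range
theorem enum_map_range {β : Type} (g : Nat → β) (m : Nat) (s : Int) :
    PySem.List.enumerate ((List.range m).map g) s
      = (List.range m).map (fun (k : Nat) => (s + (k : Int), g k)) := by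
  induction m generalizing s with
  | zero => simp [PySem.List.enumerate_nil]
  | succ m ih =>
      rw [List.range_succ, List.map_append, List.map_append,
        PySem.List.enumerate_append, ih]
      simp

-- the counter-carrying fold is the fold over the enumerated list
theorem pairfold_enum {β : Type} (g : Int → Int → β → β) (l : List Int) (i : Int) (acc : β) :
    (l.foldl (fun (st : Int × β) term => (st.1 + 1, g st.1 term st.2)) (i, acc)).2
      = (PySem.List.enumerate l i).foldl (fun acc p => g p.1 p.2 acc) acc := by
  induction l generalizing i acc with
  | nil => simp [PySem.List.enumerate_nil]
  | cons x xs ih => rw [PySem.List.enumerate_cons]; simp only [List.foldl_cons]; exact ih _ _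

-- the loop "skip if p, cons f x if q" is a reversed filter-map
theorem foldl_skip_cons {α β : Type} (p q : α → Prop) [DecidablePred p] [DecidablePred q]
    (f : α → β) (l : List α) (acc : List β) :
    l.foldl (fun acc x => if p x then acc else if q x then f x :: acc else acc) acc
      = ((l.filter (fun x => decide (¬ p x ∧ q x))).map f).reverse ++ acc := by
  induction l generalizing acc with
  | nil => simp
  | cons x xs ih =>
      simp only [List.foldl_cons, List.filter_cons]
      by_cases hp : p x
      · simp [hp, ih]
      · by_cases hq : q x
        · simp [hp, hq, ih]
        · simp [hp, hq, ih]

-- two strictly increasing lists with the same members are equal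
theorem eq_of_mem_iff_of_pairwise_lt (l₁ l₂ : List Int)
    (h₁ : l₁.Pairwise (· < ·)) (h₂ : l₂.Pairwise (· < ·))
    (hm : ∀ x, x ∈ l₁ ↔ x ∈ l₂) : l₁ = l₂ := by
  refine ((List.perm_ext_iff_of_nodup h₁.nodup h₂.nodup).mpr hm).eq_of_pairwise ?_ h₁ h₂
  intro a b _ _ hab hba
  exact absurd hab (not_lt.mpr hba.le)

theorem getTerms_eq (number maxBase : Int) :
    getTerms number maxBase = getTerms_alt number maxBase := by
  unfold getTerms getTerms_alt
  rw [pairfold_enum (fun index term terms =>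
        if index = 0 then terms
        else if number = index + term ∧ index ≤ term ∧ term < maxBase then (index, term) :: terms
        else terms)]
  rw [PySem.List.pyRange_neg_one]
  have h0 : number - 0 = number := by ring
  rw [h0, enum_map_range]
  rw [foldl_skip_cons (fun p : Int × Int => p.1 = 0)
      (fun p : Int × Int => number = p.1 + p.2 ∧ p.1 ≤ p.2 ∧ p.2 < maxBase)
      (fun p => (p.1, p.2))]
  rw [List.append_nil, List.reverse_reverse, List.filter_map, List.map_map]
  have key :
      ((List.range number.toNat).filter
        ((fun x : Int × Int => decide (¬ x.1 = 0 ∧ number = x.1 + x.2 ∧ x.1 ≤ x.2 ∧ x.2 < maxBase)) ∘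
          (fun k : Nat => ((0 : Int) + (k : Int), number - (k : Int))))).map
        (fun k : Nat => ((k : Int))) =
      PySem.List.pyRange (max 1 (number - maxBase + 1)) (PySem.Int.floordiv number 2 + 1) 1 := by
    apply eq_of_mem_iff_of_pairwise_lt
    · exact (List.pairwise_lt_range.filter _).map _ (by intro a b h; exact_mod_cast h)
    · exact PySem.List.pairwise_lt_pyRange_one _ _
    · intro x
      rw [PySem.List.mem_pyRange_one]
      rw [PySem.Int.floordiv_eq_ediv_of_pos (by norm_num : (0:Int) < 2)]
      simp only [List.mem_map, List.mem_filter, List.mem_range, Function.comp,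
        decide_eq_true_eq]
      constructor
      · rintro ⟨k, ⟨hk, hne, _, hle, hlt⟩, rfl⟩
        have : (k : Int) < number := by
          rcases Int.lt_or_le number 0 with h | h
          · simp [Int.toNat_of_nonpos h.le] at hk
          · omega
        omega
      · intro ⟨hlo, hhi⟩
        have hx0 : 0 < x := lt_of_lt_of_le one_pos (le_trans (le_max_left _ _) hlo)
        refine ⟨x.toNat, ⟨?_, by omega, by omega, by omega, by omega⟩, by omega⟩
        have hxn : x < number := by omega
        omega
  rw [← key, List.map_map]
  apply List.map_congr_left
  intro k _
  simp
-- ===== VERDICT (by name: the statement is the Claim_ definition above) =====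
theorem getTerms_spec : Claim_equal_getTerms := by
  intro number maxBase _
  exact getTerms_eq number maxBase
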